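-- pv_equiv track=rewrite | github.com/azamuray/vella | backend/app/game/rpg/base_grid.py | build_grid_from_buildings
-- ===== SOURCE A (Python) =====
-- from typing import List, Tuple, Optional
--
-- BASE_GRID_SIZE = 16  # 16x16 cells
--
-- def build_grid_from_buildings(buildings: list) -> List[List[Optional[int]]]:
--     """Build grid state from list of building dicts with grid_x, grid_y, width, height, id."""
--     grid = [[None for _ in range(BASE_GRID_SIZE)] for _ in range(BASE_GRID_SIZE)]
--     for b in buildings:
--         w = b.get("width", 1)
--         h = b.get("height", 1)
--         for dy in range(h):
--             for dx in range(w):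
--                 gy = b["grid_y"] + dy
--                 gx = b["grid_x"] + dx
--                 if 0 <= gy < BASE_GRID_SIZE and 0 <= gx < BASE_GRID_SIZE:
--                     grid[gy][gx] = b["id"]
--     return grid
-- ===== SOURCE B (Python) =====
-- BASE_GRID_SIZE = 16
--
-- def build_grid_from_buildings(buildings):
--     """Per-cell ownership query instead of per-building rectangle fill:
--     each cell asks, scanning the buildings from last to first, which
--     building's footprint covers it (last writer wins)."""
--     rev = list(reversed(buildings))
--
--     def owner(gy, gx):
--         for b in rev:
--             w = b.get("width", 1)
--             h = b.get("height", 1)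
--             if (w > 0 and h > 0
--                     and b["grid_y"] <= gy < b["grid_y"] + h
--                     and b["grid_x"] <= gx < b["grid_x"] + w):
--                 return b["id"]
--         return None
--
--     return [[owner(gy, gx) for gx in range(BASE_GRID_SIZE)]
--             for gy in range(BASE_GRID_SIZE)]
-- ===== Notes on version B (the rewrite author's own statement) =====
-- stated objective: alternative
-- what changed: A writes each building's footprint into the grid cell by cell (last building overwrites); B inverts the traversal: each of the 256 cells queries the reversed building list for the first (i.e. last-added) building whose footprint covers it, so no grid mutation or per-footprint loop exists.
import Mathlib
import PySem

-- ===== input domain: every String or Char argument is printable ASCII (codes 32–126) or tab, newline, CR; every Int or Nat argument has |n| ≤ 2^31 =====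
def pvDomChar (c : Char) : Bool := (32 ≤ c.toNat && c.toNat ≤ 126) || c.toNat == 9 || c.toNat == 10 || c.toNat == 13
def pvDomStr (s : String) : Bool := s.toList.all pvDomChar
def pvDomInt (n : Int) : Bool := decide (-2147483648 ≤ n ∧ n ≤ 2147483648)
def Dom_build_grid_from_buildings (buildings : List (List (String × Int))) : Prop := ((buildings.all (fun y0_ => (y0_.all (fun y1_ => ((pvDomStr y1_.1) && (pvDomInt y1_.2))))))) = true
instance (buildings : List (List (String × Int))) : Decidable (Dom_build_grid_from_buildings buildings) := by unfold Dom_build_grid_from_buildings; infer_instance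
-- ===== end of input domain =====

-- B inverts A's traversal: instead of writing each building's footprint into a mutable grid,
-- every cell queries the reversed building list for the first footprint covering it (objective: alternative).

-- ===== PORT A =====
-- transliteration of the assignment 'grid[gy][gx] = v'
def pvSetCell (grid : List (List (Option Int))) (gy gx : Int) (v : Int) : List (List (Option Int)) :=
  grid.modify gy.toNat (fun row => row.set gx.toNat (some v))

def build_grid_from_buildings (buildings : List (List (String × Int))) : List (List (Option Int)) :=
  let grid0 := List.replicate 16 (List.replicate 16 (none : Option Int))
  buildings.foldl (fun grid b =>
    let d := PySem.Dict.ofList b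
    let w := d.getD "width" 1
    let h := d.getD "height" 1
    (PySem.List.pyRange 0 h 1).foldl (fun grid dy =>
      (PySem.List.pyRange 0 w 1).foldl (fun grid dx =>
        -- b["grid_y"] / b["grid_x"] / b["id"]: KeyError (= none) is excluded by Pre_
        let gy := (d.get? "grid_y").getD 0 + dy
        let gx := (d.get? "grid_x").getD 0 + dx
        if 0 ≤ gy ∧ gy < 16 ∧ 0 ≤ gx ∧ gx < 16 then
          pvSetCell grid gy gx ((d.get? "id").getD 0)
        else grid) grid) grid) grid0

-- ===== PORT B =====
-- the 'owner' loop of Source B: scan the (already reversed) building list, return the first match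
def pvOwner (bs : List (List (String × Int))) (gy gx : Int) : Option Int :=
  match bs with
  | [] => none
  | b :: rest =>
    let d := PySem.Dict.ofList b
    let w := d.getD "width" 1
    let h := d.getD "height" 1
    if 0 < w ∧ 0 < h ∧
       (d.get? "grid_y").getD 0 ≤ gy ∧ gy < (d.get? "grid_y").getD 0 + h ∧
       (d.get? "grid_x").getD 0 ≤ gx ∧ gx < (d.get? "grid_x").getD 0 + w then
      some ((d.get? "id").getD 0)
    else pvOwner rest gy gx

def build_grid_from_buildings_alt (buildings : List (List (String × Int))) : List (List (Option Int)) :=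
  let rev := buildings.reverse
  (PySem.List.pyRange 0 16 1).map (fun gy =>
    (PySem.List.pyRange 0 16 1).map (fun gx => pvOwner rev gy gx))

-- ===== PRECONDITION & SPEC =====
-- Pre_ excludes exactly the inputs where Python A raises KeyError: a building with positive
-- width and height missing "grid_x"/"grid_y", or one whose clipped footprint is non-empty
-- but which is missing "id" (A reads "id" lazily, only when some cell is in bounds).
def Pre_build_grid_from_buildings (buildings : List (List (String × Int))) : Prop :=
  ∀ b ∈ buildings,
    (0 < (PySem.Dict.ofList b).getD "width" 1 ∧ 0 < (PySem.Dict.ofList b).getD "height" 1) →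
      (((PySem.Dict.ofList b).get? "grid_y").isSome = true ∧
       ((PySem.Dict.ofList b).get? "grid_x").isSome = true ∧
       (((PySem.Dict.ofList b).getD "grid_y" 0 < 16 ∧
         0 < (PySem.Dict.ofList b).getD "grid_y" 0 + (PySem.Dict.ofList b).getD "height" 1 ∧
         (PySem.Dict.ofList b).getD "grid_x" 0 < 16 ∧
         0 < (PySem.Dict.ofList b).getD "grid_x" 0 + (PySem.Dict.ofList b).getD "width" 1) →
        ((PySem.Dict.ofList b).get? "id").isSome = true))
instance (buildings : List (List (String × Int))) : Decidable (Pre_build_grid_from_buildings buildings) := by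
  unfold Pre_build_grid_from_buildings; infer_instance

def pvWitness_build_grid_from_buildings : (List (List (String × Int))) :=
  [[("grid_x", 1), ("grid_y", 2), ("id", 7)],
   [("grid_x", -1), ("grid_y", 14), ("width", 3), ("height", 5), ("id", 9)]]

def Spec_build_grid_from_buildings (buildings : List (List (String × Int))) (out : List (List (Option Int))) : Prop := out = build_grid_from_buildings_alt buildings
instance (buildings : List (List (String × Int))) (out : List (List (Option Int))) : Decidable (Spec_build_grid_from_buildings buildings out) := by unfold Spec_build_grid_from_buildings; infer_instance

-- ===== CLAIM (what is proved, stated in full; the proofs are below) =====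
def Claim_equal_build_grid_from_buildings : Prop := ∀ (buildings : List (List (String × Int))), Dom_build_grid_from_buildings buildings → Pre_build_grid_from_buildings buildings → Spec_build_grid_from_buildings buildings (build_grid_from_buildings buildings)

-- ===== LEMMAS AND PROOFS =====

-- the value of cell (y, x) of a grid (getD, so no bounds side conditions)
def pvCell (g : List (List (Option Int))) (y x : Nat) : Option Int :=
  (g.getD y []).getD x none

-- a well-formed 16×16 grid
def pvShape (g : List (List (Option Int))) : Prop :=
  g.length = 16 ∧ ∀ y : Nat, y < 16 → (g.getD y []).length = 16

theorem pvShape_set (g : List (List (Option Int))) (a bx : Int) (v : Int)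
    (hs : pvShape g) : pvShape (pvSetCell g a bx v) := by
  obtain ⟨hl, hr⟩ := hs
  refine ⟨by simpa [pvSetCell] using hl, ?_⟩
  intro y hy
  simp only [pvSetCell, List.getD, List.getElem?_modify]
  cases hgy : g[y]? with
  | none =>
      rw [List.getElem?_eq_none_iff] at hgy; omega
  | some row =>
      have hrow : row.length = 16 := by
        have := hr y hy; simpa [List.getD, hgy] using this
      by_cases he : a.toNat = y <;> simp [he, hrow]

theorem pvCell_set (g : List (List (Option Int))) (a bx : Int) (v : Int) (y x : Nat)
    (hs : pvShape g) (ha : 0 ≤ a ∧ a < 16) (hb : 0 ≤ bx ∧ bx < 16) :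
    pvCell (pvSetCell g a bx v) y x =
      if (y : Int) = a ∧ (x : Int) = bx then some v else pvCell g y x := by
  obtain ⟨hl, hr⟩ := hs
  by_cases hey : a.toNat = y
  · have hy16 : y < 16 := by omega
    have hrow : (g.getD y []).length = 16 := hr y hy16
    have hgy : ∃ row, g[y]? = some row := by
      refine ⟨g[y], ?_⟩; exact List.getElem?_eq_getElem (by omega)
    obtain ⟨row, hrowe⟩ := hgy
    have hrl : row.length = 16 := by simpa [List.getD, hrowe] using hrow
    simp only [pvCell, pvSetCell, List.getD, List.getElem?_modify, hrowe, hey,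
      Option.getD_some]
    by_cases hex : bx.toNat = x
    · have hx16 : x < 16 := by omega
      rw [if_pos ⟨by omega, by omega⟩]
      have : (row.set bx.toNat (some v))[x]? = some (some v) := by
        rw [hex]
        exact List.getElem?_set_self (by omega)
      simp [this]
    · rw [if_neg (by omega)]
      simp [List.getElem?_set_ne hex]
  · rw [if_neg (by omega)]
    simp only [pvCell, pvSetCell, List.getD, List.getElem?_modify]
    cases hgy : g[y]? with
    | none => simp
    | some row => simp [hey]

-- a fold preserves an invariant each step preserves
theorem foldl_preserve {α β : Type} (P : α → Prop) (F : α → β → α) (l : List β) (g : α)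
    (hstep : ∀ a b, P a → P (F a b)) (h0 : P g) : P (l.foldl F g) := by
  induction l generalizing g with
  | nil => exact h0
  | cons b bs ih => exact ih (F g b) (hstep g b h0)

-- inner loop of A: columns [gx, gx+n) of row r, bounds-tested per cell
theorem cell_inner (n : Nat) (r off v : Int) (g : List (List (Option Int))) (y x : Nat)
    (hs : pvShape g) :
    pvCell ((PySem.List.pyRange 0 (n : Int) 1).foldl (fun g dx =>
        if 0 ≤ r ∧ r < 16 ∧ 0 ≤ off + dx ∧ off + dx < 16 then
          pvSetCell g r (off + dx) v else g) g) y x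
    = if (y : Int) = r ∧ r < 16 ∧ off ≤ (x : Int) ∧ (x : Int) < off + n ∧ (x : Int) < 16 then
        some v else pvCell g y x := by
  induction n generalizing g with
  | zero =>
      rw [PySem.List.pyRange_one_eq_nil (by omega)]
      simp only [List.foldl_nil]
      rw [if_neg (by push_cast; omega)]
  | succ n ih =>
      have hcast : ((n + 1 : Nat) : Int) = (n : Int) + 1 := by push_cast; ring
      rw [hcast, PySem.List.pyRange_one_succ_right (by positivity), List.foldl_append]
      simp only [List.foldl_cons, List.foldl_nil]
      have hsn : pvShape ((PySem.List.pyRange 0 (n : Int) 1).foldl (fun g dx =>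
          if 0 ≤ r ∧ r < 16 ∧ 0 ≤ off + dx ∧ off + dx < 16 then
            pvSetCell g r (off + dx) v else g) g) := by
        refine foldl_preserve pvShape _ _ g ?_ hs
        intro a b ha
        by_cases hc : 0 ≤ r ∧ r < 16 ∧ 0 ≤ off + b ∧ off + b < 16
        · rw [if_pos hc]; exact pvShape_set a r (off + b) v ha
        · rw [if_neg hc]; exact ha
      by_cases hc : 0 ≤ r ∧ r < 16 ∧ 0 ≤ off + (n : Int) ∧ off + (n : Int) < 16
      · rw [if_pos hc, pvCell_set _ _ _ _ _ _ hsn ⟨hc.1, hc.2.1⟩ ⟨hc.2.2.1, hc.2.2.2⟩, ih g hs]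
        split_ifs with h1 h2 h3 h4 h5 <;> first | rfl | omega
      · rw [if_neg hc, ih g hs]
        split_ifs with h1 h2 h3 <;> first | rfl | omega

-- same with an Int column count (empty when w ≤ 0)
theorem cell_inner_int (w r off v : Int) (g : List (List (Option Int))) (y x : Nat)
    (hs : pvShape g) :
    pvCell ((PySem.List.pyRange 0 w 1).foldl (fun g dx =>
        if 0 ≤ r ∧ r < 16 ∧ 0 ≤ off + dx ∧ off + dx < 16 then
          pvSetCell g r (off + dx) v else g) g) y x
    = if (y : Int) = r ∧ r < 16 ∧ off ≤ (x : Int) ∧ (x : Int) < off + w ∧ (x : Int) < 16 then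
        some v else pvCell g y x := by
  by_cases hw : w ≤ 0
  · rw [PySem.List.pyRange_one_eq_nil hw]
    simp only [List.foldl_nil]
    rw [if_neg (by omega)]
  · obtain ⟨n, rfl⟩ : ∃ n : Nat, w = (n : Int) := ⟨w.toNat, by omega⟩
    exact cell_inner n r off v g y x hs

-- shape is preserved by A's per-building step and by the whole fold
theorem pvShape_inner (w r off v : Int) (g : List (List (Option Int))) (hs : pvShape g) :
    pvShape ((PySem.List.pyRange 0 w 1).foldl (fun g dx =>
        if 0 ≤ r ∧ r < 16 ∧ 0 ≤ off + dx ∧ off + dx < 16 then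
          pvSetCell g r (off + dx) v else g) g) := by
  refine foldl_preserve pvShape _ _ g ?_ hs
  intro a b ha
  by_cases hc : 0 ≤ r ∧ r < 16 ∧ 0 ≤ off + b ∧ off + b < 16
  · rw [if_pos hc]; exact pvShape_set a r (off + b) v ha
  · rw [if_neg hc]; exact ha

-- outer loop of A over rows, characterised per cell
theorem cell_outer (m : Nat) (w gy gx v : Int) (g : List (List (Option Int))) (y x : Nat)
    (hs : pvShape g) :
    pvCell ((PySem.List.pyRange 0 (m : Int) 1).foldl (fun g dy =>
        (PySem.List.pyRange 0 w 1).foldl (fun g dx =>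
          if 0 ≤ gy + dy ∧ gy + dy < 16 ∧ 0 ≤ gx + dx ∧ gx + dx < 16 then
            pvSetCell g (gy + dy) (gx + dx) v else g) g) g) y x
    = if gy ≤ (y : Int) ∧ (y : Int) < gy + m ∧ (y : Int) < 16 ∧
          gx ≤ (x : Int) ∧ (x : Int) < gx + w ∧ (x : Int) < 16 then
        some v else pvCell g y x := by
  induction m generalizing g with
  | zero =>
      simp only [Nat.cast_zero]
      rw [PySem.List.pyRange_one_eq_nil (b := (0 : Int)) le_rfl]
      simp only [List.foldl_nil]
      rw [if_neg (by omega)]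
  | succ m ih =>
      have hcast : ((m + 1 : Nat) : Int) = (m : Int) + 1 := by push_cast; ring
      rw [hcast, PySem.List.pyRange_one_succ_right (by positivity), List.foldl_append]
      simp only [List.foldl_cons, List.foldl_nil]
      have hsm : pvShape ((PySem.List.pyRange 0 (m : Int) 1).foldl (fun g dy =>
          (PySem.List.pyRange 0 w 1).foldl (fun g dx =>
            if 0 ≤ gy + dy ∧ gy + dy < 16 ∧ 0 ≤ gx + dx ∧ gx + dx < 16 then
              pvSetCell g (gy + dy) (gx + dx) v else g) g) g) := by
        refine foldl_preserve pvShape _ _ g ?_ hs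
        intro a b ha
        exact pvShape_inner w (gy + b) gx v a ha
      have hinner : ∀ (acc : List (List (Option Int))) (dy : Int),
          (PySem.List.pyRange 0 w 1).foldl (fun g dx =>
            if 0 ≤ gy + dy ∧ gy + dy < 16 ∧ 0 ≤ gx + dx ∧ gx + dx < 16 then
              pvSetCell g (gy + dy) (gx + dx) v else g) acc
          = (PySem.List.pyRange 0 w 1).foldl (fun g dx =>
            if 0 ≤ (gy + dy) ∧ (gy + dy) < 16 ∧ 0 ≤ gx + dx ∧ gx + dx < 16 then
              pvSetCell g (gy + dy) (gx + dx) v else g) acc := fun _ _ => rfl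
      rw [cell_inner_int w (gy + (m : Int)) gx v _ y x hsm, ih g hs]
      split_ifs with h1 h2 h3 h4 h5 <;> first | rfl | omega

theorem cell_outer_int (h w gy gx v : Int) (g : List (List (Option Int))) (y x : Nat)
    (hs : pvShape g) :
    pvCell ((PySem.List.pyRange 0 h 1).foldl (fun g dy =>
        (PySem.List.pyRange 0 w 1).foldl (fun g dx =>
          if 0 ≤ gy + dy ∧ gy + dy < 16 ∧ 0 ≤ gx + dx ∧ gx + dx < 16 then
            pvSetCell g (gy + dy) (gx + dx) v else g) g) g) y x
    = if gy ≤ (y : Int) ∧ (y : Int) < gy + h ∧ (y : Int) < 16 ∧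
          gx ≤ (x : Int) ∧ (x : Int) < gx + w ∧ (x : Int) < 16 then
        some v else pvCell g y x := by
  by_cases hh : h ≤ 0
  · rw [PySem.List.pyRange_one_eq_nil hh]
    simp only [List.foldl_nil]
    rw [if_neg (by omega)]
  · obtain ⟨m, rfl⟩ : ∃ m : Nat, h = (m : Int) := ⟨h.toNat, by omega⟩
    exact cell_outer m w gy gx v g y x hs

-- A's per-building step, abbreviated
def pvStepA (grid : List (List (Option Int))) (b : List (String × Int)) :
    List (List (Option Int)) :=
  let d := PySem.Dict.ofList b
  let w := d.getD "width" 1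
  let h := d.getD "height" 1
  (PySem.List.pyRange 0 h 1).foldl (fun grid dy =>
    (PySem.List.pyRange 0 w 1).foldl (fun grid dx =>
      let gy := (d.get? "grid_y").getD 0 + dy
      let gx := (d.get? "grid_x").getD 0 + dx
      if 0 ≤ gy ∧ gy < 16 ∧ 0 ≤ gx ∧ gx < 16 then
        pvSetCell grid gy gx ((d.get? "id").getD 0)
      else grid) grid) grid

theorem pvShape_stepA (g : List (List (Option Int))) (b : List (String × Int))
    (hs : pvShape g) : pvShape (pvStepA g b) := by
  unfold pvStepA
  refine foldl_preserve pvShape _ _ g ?_ hs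
  intro a dy ha
  exact pvShape_inner _ _ _ _ a ha

-- one step of A per cell = pvOwner's per-building test (for on-board cells)
theorem cell_stepA (g : List (List (Option Int))) (b : List (String × Int)) (y x : Nat)
    (hs : pvShape g) (hy : y < 16) (hx : x < 16) :
    pvCell (pvStepA g b) y x =
      (if 0 < (PySem.Dict.ofList b).getD "width" 1 ∧
          0 < (PySem.Dict.ofList b).getD "height" 1 ∧
          ((PySem.Dict.ofList b).get? "grid_y").getD 0 ≤ (y : Int) ∧
          (y : Int) < ((PySem.Dict.ofList b).get? "grid_y").getD 0 + (PySem.Dict.ofList b).getD "height" 1 ∧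
          ((PySem.Dict.ofList b).get? "grid_x").getD 0 ≤ (x : Int) ∧
          (x : Int) < ((PySem.Dict.ofList b).get? "grid_x").getD 0 + (PySem.Dict.ofList b).getD "width" 1 then
        some (((PySem.Dict.ofList b).get? "id").getD 0)
      else pvCell g y x) := by
  unfold pvStepA
  rw [cell_outer_int _ _ _ _ _ g y x hs]
  split_ifs with h1 h2 <;> first | rfl | omega

-- the whole fold of A per cell: the last covering building wins = first match in the reverse
theorem pvOwner_append (l l2 : List (List (String × Int))) (gy gx : Int) :
    pvOwner (l ++ l2) gy gx = (pvOwner l gy gx).elim (pvOwner l2 gy gx) some := by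
  induction l with
  | nil => rfl
  | cons d l ihl =>
      simp only [List.cons_append, pvOwner]
      split
      · rfl
      · exact ihl

-- the whole fold of A per cell: the last covering building wins = first match in the reverse
theorem cell_fold (bs : List (List (String × Int))) (g : List (List (Option Int))) (y x : Nat)
    (hs : pvShape g) (hy : y < 16) (hx : x < 16) :
    pvCell (bs.foldl pvStepA g) y x =
      ((pvOwner bs.reverse (y : Int) (x : Int)).elim (pvCell g y x) some) := by
  induction bs generalizing g with
  | nil => simp [pvOwner]
  | cons b rest ih =>
      have hsb : pvShape (pvStepA g b) := pvShape_stepA g b hs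
      rw [List.foldl_cons, ih (pvStepA g b) hsb, List.reverse_cons,
        pvOwner_append rest.reverse [b]]
      cases pvOwner rest.reverse (y : Int) (x : Int) with
      | some v => simp
      | none =>
          simp only [Option.elim_none]
          rw [cell_stepA g b y x hs hy hx]
          simp only [pvOwner]
          split <;> rfl

theorem pvShape_grid0 : pvShape (List.replicate 16 (List.replicate 16 (none : Option Int))) := by
  constructor
  · simp
  · intro y hy
    rw [List.getD, List.getElem?_replicate, if_pos hy]
    simp

theorem cell_grid0 (y x : Nat) :
    pvCell (List.replicate 16 (List.replicate 16 (none : Option Int))) y x = none := by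
  simp only [pvCell, List.getD, List.getElem?_replicate]
  by_cases hy : y < 16
  · rw [if_pos hy]
    simp only [Option.getD_some, List.getElem?_replicate]
    by_cases hx : x < 16 <;> simp [hx]
  · rw [if_neg hy]; simp

theorem pyRange16 : PySem.List.pyRange 0 16 1 =
    [0, 1, 2, 3, 4, 5, 6, 7, 8, 9, 10, 11, 12, 13, 14, 15] := by decide

-- getElem access of a shape-16 grid equals pvCell
theorem getElem_eq_cell (g : List (List (Option Int))) (_hs : pvShape g)
    (y x : Nat) (hy : y < g.length) (hx : x < (g[y]'hy).length) :
    (g[y]'hy)[x]'hx = pvCell g y x := by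
  simp [pvCell, List.getD, List.getElem?_eq_getElem hy,
    List.getElem?_eq_getElem hx]

-- ===== VERDICT (by name: the statement is the Claim_ definition above) =====
theorem build_grid_from_buildings_spec : Claim_equal_build_grid_from_buildings := by
  intro buildings _ _
  unfold Spec_build_grid_from_buildings
  show buildings.foldl pvStepA (List.replicate 16 (List.replicate 16 (none : Option Int)))
      = build_grid_from_buildings_alt buildings
  have hsA : pvShape (buildings.foldl pvStepA (List.replicate 16 (List.replicate 16 (none : Option Int)))) :=
    foldl_preserve pvShape pvStepA buildings _ pvShape_stepA pvShape_grid0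
  have hB : build_grid_from_buildings_alt buildings =
      (PySem.List.pyRange 0 16 1).map (fun gy =>
        (PySem.List.pyRange 0 16 1).map (fun gx => pvOwner buildings.reverse gy gx)) := rfl
  rw [hB, pyRange16]
  apply List.ext_getElem
  · rw [hsA.1]; rfl
  · intro y hyA hyB
    have hy16 : y < 16 := by simpa using hyB
    apply List.ext_getElem
    · have h16 := hsA.2 y hy16
      simp only [List.getD, List.getElem?_eq_getElem hyA, Option.getD_some] at h16
      rw [h16, List.getElem_map]
      simp
    · intro x hxA hxB
      have hx16 : x < 16 := by
        simp only [List.getElem_map, List.length_map, List.length_cons, List.length_nil] at hxB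
        omega
      rw [getElem_eq_cell _ hsA y x hyA hxA,
        cell_fold buildings _ y x pvShape_grid0 hy16 hx16, cell_grid0]
      have hylit : ([0, 1, 2, 3, 4, 5, 6, 7, 8, 9, 10, 11, 12, 13, 14, 15] : List Int)[y]'(by simp only [List.length_cons, List.length_nil]; omega) = (y : Int) := by
        interval_cases y <;> rfl
      have hxlit : ([0, 1, 2, 3, 4, 5, 6, 7, 8, 9, 10, 11, 12, 13, 14, 15] : List Int)[x]'(by simp only [List.length_cons, List.length_nil]; omega) = (x : Int) := by
        interval_cases x <;> rfl
      simp only [List.getElem_map, hylit, hxlit]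
      cases pvOwner buildings.reverse (y : Int) (x : Int) <;> rfl
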